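-- pv_equiv track=rewrite | github.com/dreamtheater123/DA_GNN | data_augmentation/GAboL.py | find_trainmask_index
-- ===== SOURCE A (Python) =====
-- def find_trainmask_index(train_mask):
--     """
--     this function finds the split index for train_mask
--     :param train_mask: the train_mask in a graph object
--     :return: the split index for train_mask
--     """
--     split_indexes = []
--     for index, item in enumerate(train_mask):
--         if index == 0:  # train_mask[0] is True
--             split_indexes.append(index)
--         else:
--             if train_mask[index] != train_mask[index-1]:
--                 split_indexes.append(index)
--
--     return split_indexes
-- ===== SOURCE B (Python) =====
-- def find_trainmask_index(train_mask):
--     """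
--     this function finds the split index for train_mask
--     :param train_mask: the train_mask in a graph object
--     :return: the split index for train_mask
--     """
--     split_indexes = []
--     i = 0
--     n = len(train_mask)
--     while i < n:
--         split_indexes.append(i)          # i starts a run
--         j = i + 1
--         while j < n and train_mask[j] == train_mask[i]:
--             j += 1                       # skip the rest of this run
--         i = j
--     return split_indexes
-- ===== Notes on version B (the rewrite author's own statement) =====
-- stated objective: alternative
-- what changed: Replaced the per-element compare-with-predecessor scan by a run-skipping two-pointer loop: record each run's start index and jump straight past the run with an inner scan.
import Mathlib
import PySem

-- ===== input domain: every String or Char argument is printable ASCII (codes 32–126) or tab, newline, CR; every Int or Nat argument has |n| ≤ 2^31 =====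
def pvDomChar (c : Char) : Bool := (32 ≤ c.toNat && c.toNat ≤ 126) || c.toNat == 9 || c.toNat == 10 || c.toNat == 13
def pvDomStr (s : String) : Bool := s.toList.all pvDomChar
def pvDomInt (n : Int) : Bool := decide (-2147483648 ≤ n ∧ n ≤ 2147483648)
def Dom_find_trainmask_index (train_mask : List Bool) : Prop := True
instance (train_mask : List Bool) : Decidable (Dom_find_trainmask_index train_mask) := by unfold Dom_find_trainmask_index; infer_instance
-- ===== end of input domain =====

-- B replaces A's per-element compare-with-predecessor scan by a run-skipping two-pointer loop (objective: alternative, same cost).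

-- ===== PORT A =====
-- for-loop over enumerate(train_mask), appending `index` when index == 0 or train_mask[index] != train_mask[index-1];
-- pyGetD is exact here since every index used (index, index-1 with index ≥ 1) is in range.
def find_trainmask_index (train_mask : List Bool) : List Int :=
  (PySem.List.enumerate train_mask).foldl
    (fun acc p =>
      if p.1 = 0 then acc ++ [p.1]
      else
        if PySem.List.pyGetD train_mask p.1 false ≠ PySem.List.pyGetD train_mask (p.1 - 1) false
        then acc ++ [p.1] else acc)
    []

-- ===== PORT B =====
-- inner while of Source B: `while j < n and train_mask[j] == train_mask[i]: j += 1` (v = train_mask[i]);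
-- pyGetD is exact since the guard keeps 0 ≤ i+1 ≤ j < n = len(train_mask).
def pvInnerWhile (train_mask : List Bool) (n : Int) (v : Bool) (j : Int) : Int :=
  if h : j < n ∧ PySem.List.pyGetD train_mask j false = v then
    pvInnerWhile train_mask n v (j + 1)
  else j
termination_by (n - j).toNat
decreasing_by omega

theorem pvInnerLe (train_mask : List Bool) (n : Int) (v : Bool) (j : Int) :
    j ≤ pvInnerWhile train_mask n v j := by
  unfold pvInnerWhile
  split
  · have := pvInnerLe train_mask n v (j + 1); omega
  · exact le_rfl
termination_by (n - j).toNat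
decreasing_by omega

-- outer while of Source B: append the run start i, then jump to the end of the run
def pvOuterWhile (train_mask : List Bool) (n : Int) (i : Int) (res : List Int) : List Int :=
  if h : i < n then
    pvOuterWhile train_mask n
      (pvInnerWhile train_mask n (PySem.List.pyGetD train_mask i false) (i + 1))
      (res ++ [i])
  else res
termination_by (n - i).toNat
decreasing_by
  have := pvInnerLe train_mask n (PySem.List.pyGetD train_mask i false) (i + 1)
  omega

def find_trainmask_index_alt (train_mask : List Bool) : List Int :=
  pvOuterWhile train_mask (train_mask.length : Int) 0 []

-- ===== PRECONDITION & SPEC =====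
def Spec_find_trainmask_index (train_mask : List Bool) (out : List Int) : Prop := out = find_trainmask_index_alt train_mask
instance (train_mask : List Bool) (out : List Int) : Decidable (Spec_find_trainmask_index train_mask out) := by unfold Spec_find_trainmask_index; infer_instance

-- ===== CLAIM (what is proved, stated in full; the proofs are below) =====
def Claim_equal_find_trainmask_index : Prop := ∀ (train_mask : List Bool), Dom_find_trainmask_index train_mask → Spec_find_trainmask_index train_mask (find_trainmask_index train_mask)

-- ===== LEMMAS AND PROOFS =====

-- the split condition of A, as a predicate on the index
def pvCond (tm : List Bool) (m : Int) : Bool :=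
  m = 0 || PySem.List.pyGetD tm m false ≠ PySem.List.pyGetD tm (m - 1) false

theorem pvA_eq_filter (tm : List Bool) :
    find_trainmask_index tm
      = (PySem.List.pyRange 0 (tm.length : Int)).filter (pvCond tm) := by
  have h1 : find_trainmask_index tm
      = ((PySem.List.enumerate tm).map (fun p => p.1)).foldl
          (fun acc m => if pvCond tm m then acc ++ [m] else acc) [] := by
    rw [List.foldl_map]
    unfold find_trainmask_index
    congr 1
    funext acc p
    by_cases h : p.1 = 0
    · simp [pvCond, h]
    · by_cases h2 : PySem.List.pyGetD tm p.1 false = PySem.List.pyGetD tm (p.1 - 1) false <;>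
        simp [pvCond, h, h2]
  rw [h1, PySem.List.map_fst_enumerate]
  have h2 := PySem.List.foldl_append_if (pvCond tm) (fun m => m)
    (PySem.List.pyRange 0 (0 + (tm.length : Int))) []
  simp only [List.map_id_fun', id] at h2 ⊢
  rw [h2]
  simp

theorem pvInner_spec (tm : List Bool) (n : Int) (v : Bool) (j : Int) (hjn : j ≤ n) :
    pvInnerWhile tm n v j ≤ n ∧
    (∀ k, j ≤ k → k < pvInnerWhile tm n v j → PySem.List.pyGetD tm k false = v) ∧
    (pvInnerWhile tm n v j < n → PySem.List.pyGetD tm (pvInnerWhile tm n v j) false ≠ v) := by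
  unfold pvInnerWhile
  split
  · rename_i h
    have IH := pvInner_spec tm n v (j + 1) (by omega)
    refine ⟨IH.1, ?_, IH.2.2⟩
    intro k hk1 hk2
    by_cases hkj : k = j
    · subst hkj; exact h.2
    · exact IH.2.1 k (by omega) hk2
  · rename_i h
    push Not at h
    exact ⟨hjn, fun k hk1 hk2 => absurd hk2 (by omega), h⟩
termination_by (n - j).toNat
decreasing_by omega

theorem pvOuter_append (tm : List Bool) (n i : Int) (res : List Int) :
    pvOuterWhile tm n i res = res ++ pvOuterWhile tm n i [] := by
  unfold pvOuterWhile
  split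
  · rename_i h
    rw [pvOuter_append tm n _ (res ++ [i]),
        pvOuter_append tm n _ ([] ++ [i])]
    simp
  · simp
termination_by (n - i).toNat
decreasing_by all_goals
  have := pvInnerLe tm n (PySem.List.pyGetD tm i false) (i + 1)
  omega

theorem pvOuter_filter (tm : List Bool) (i : Int)
    (h0 : 0 ≤ i) (hin : i ≤ (tm.length : Int))
    (hc : i < (tm.length : Int) → pvCond tm i = true) :
    pvOuterWhile tm (tm.length : Int) i []
      = (PySem.List.pyRange i (tm.length : Int)).filter (pvCond tm) := by
  by_cases hi : i < (tm.length : Int)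
  case neg =>
    unfold pvOuterWhile
    rw [dif_neg hi, PySem.List.pyRange_one_eq_nil (by omega)]
    simp
  case pos =>
    have hspec := pvInner_spec tm (tm.length : Int)
      (PySem.List.pyGetD tm i false) (i + 1) (by omega)
    have hij : i + 1 ≤ pvInnerWhile tm (tm.length : Int) (PySem.List.pyGetD tm i false) (i + 1) :=
      pvInnerLe tm (tm.length : Int) (PySem.List.pyGetD tm i false) (i + 1)
    set j := pvInnerWhile tm (tm.length : Int) (PySem.List.pyGetD tm i false) (i + 1) with hj
    have hdec : ((tm.length : Int) - j).toNat < ((tm.length : Int) - i).toNat := by omega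
    have hcondj : j < (tm.length : Int) → pvCond tm j = true := by
      intro hjlen
      have h1 : PySem.List.pyGetD tm j false ≠ PySem.List.pyGetD tm i false := hspec.2.2 hjlen
      have h2 : PySem.List.pyGetD tm (j - 1) false = PySem.List.pyGetD tm i false := by
        by_cases hmi : j - 1 = i
        · rw [hmi]
        · exact hspec.2.1 (j - 1) (by omega) (by omega)
      simp only [pvCond, Bool.or_eq_true, decide_eq_true_eq, ne_eq]
      rw [h2]
      exact Or.inr h1
    conv_lhs => rw [pvOuterWhile]
    rw [dif_pos hi, pvOuter_append,
        pvOuter_filter tm j (by omega) hspec.1 hcondj,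
        PySem.List.pyRange_one_cons hi, List.filter_cons_of_pos (hc hi),
        PySem.List.pyRange_one_append (i + 1) j (tm.length : Int) (by omega) hspec.1,
        List.filter_append]
    have hmid : (PySem.List.pyRange (i + 1) j).filter (pvCond tm) = [] := by
      rw [List.filter_eq_nil_iff]
      intro m hm
      rw [PySem.List.mem_pyRange_one] at hm
      have h1 : PySem.List.pyGetD tm m false = PySem.List.pyGetD tm i false :=
        hspec.2.1 m (by omega) hm.2
      have h2 : PySem.List.pyGetD tm (m - 1) false = PySem.List.pyGetD tm i false := by
        by_cases hmi : m - 1 = i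
        · rw [hmi]
        · exact hspec.2.1 (m - 1) (by omega) (by omega)
      simp only [pvCond, Bool.or_eq_true, decide_eq_true_eq, ne_eq, not_or]
      rw [h1, h2]
      exact ⟨by omega, by simp⟩
    rw [hmid]
    simp
termination_by ((tm.length : Int) - i).toNat
decreasing_by exact hdec

-- ===== VERDICT (by name: the statement is the Claim_ definition above) =====
theorem find_trainmask_index_spec : Claim_equal_find_trainmask_index := by
  intro tm _
  show _ = _
  rw [pvA_eq_filter, find_trainmask_index_alt,
    pvOuter_filter tm 0 le_rfl (by positivity) (fun _ => by simp [pvCond])]
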